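-- pv_equiv track=rewrite | github.com/meequz/getbook | getbook.py | del_empty_lines
-- ===== SOURCE A (Python) =====
-- def del_empty_lines(sometext):
-- 	work = sometext.split('\n')
-- 	res = []
-- 	skipflag = 0
-- 	for idx, line in enumerate(work):
-- 		if skipflag:
-- 			skipflag = 0
-- 			continue
-- 		if line:
-- 			res.append(line)
-- 			continue
-- 		try:
-- 			if not work[idx+1]:
-- 				res.append(line)
-- 				skipflag = 1
-- 				continue
-- 		except IndexError:
-- 			break
-- 	return '\n'.join(res)
-- ===== SOURCE B (Python) =====
-- def del_empty_lines(sometext):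
--     lines = sometext.split('\n')
--     n = len(lines)
--     out = []
--     i = 0
--     while i < n:
--         if lines[i]:
--             out.append(lines[i])
--             i += 1
--         else:
--             j = i
--             while j < n and not lines[j]:
--                 j += 1
--             out.extend([''] * ((j - i) // 2))
--             i = j
--     return '\n'.join(out)
-- ===== Notes on version B (the rewrite author's own statement) =====
-- stated objective: simpler
-- what changed: Replaces the skipflag + try/except lookahead state machine with an explicit run-length loop: each maximal run of m blank lines contributes m//2 blanks, non-blank lines are copied.
import Mathlib
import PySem

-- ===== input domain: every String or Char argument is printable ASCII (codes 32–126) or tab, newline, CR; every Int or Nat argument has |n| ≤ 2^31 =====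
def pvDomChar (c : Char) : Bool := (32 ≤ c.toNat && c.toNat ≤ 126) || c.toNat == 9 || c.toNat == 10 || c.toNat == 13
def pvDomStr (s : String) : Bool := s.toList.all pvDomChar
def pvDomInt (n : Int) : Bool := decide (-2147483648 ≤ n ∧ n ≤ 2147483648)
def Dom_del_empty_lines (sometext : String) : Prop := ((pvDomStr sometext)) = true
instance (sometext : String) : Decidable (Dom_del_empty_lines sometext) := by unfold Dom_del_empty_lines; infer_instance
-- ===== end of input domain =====

-- B replaces A's skipflag + try/except lookahead state machine by a run-length
-- decomposition (each maximal run of m blank lines yields m/2 blanks); return values proved equal.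

-- ===== PORT A =====
-- A's enumerate/skipflag/try-lookahead loop as the obvious structural recursion:
-- skipflag=1 means the next element is consumed without processing (done here by
-- consuming it directly); the IndexError on work[idx+1] (line empty, no next) is the
-- `[] => []` break case.
def pvLoopA : List String → List String
  | [] => []
  | [l] => if l ≠ "" then [l] else []               -- empty last line: IndexError, break
  | l :: r :: rest' =>
    if l ≠ "" then l :: pvLoopA (r :: rest')
    else if r = "" then l :: pvLoopA rest'          -- append, skipflag=1 (skip r)
    else pvLoopA (r :: rest')                       -- lookahead nonempty: drop l

def del_empty_lines (sometext : String) : String :=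
  PySem.Str.join "\n" (pvLoopA ((PySem.Chars.splitOn sometext.toList "\n".toList).map String.ofList))

-- ===== PORT B =====
-- B's outer while-loop; the inner blank-counting while-loop is takeWhile/dropWhile.
def pvLoopB : List String → List String
  | [] => []
  | l :: rest =>
    if l ≠ "" then l :: pvLoopB rest
    else
      List.replicate ((1 + (rest.takeWhile (· = "")).length) / 2) "" ++
        pvLoopB (rest.dropWhile (· = ""))
  termination_by xs => xs.length
  decreasing_by
    · simp
    · simpa using Nat.lt_succ_of_le (List.length_dropWhile_le _ _)

def del_empty_lines_alt (sometext : String) : String :=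
  PySem.Str.join "\n" (pvLoopB ((PySem.Chars.splitOn sometext.toList "\n".toList).map String.ofList))

-- ===== PRECONDITION & SPEC =====
def Spec_del_empty_lines (sometext : String) (out : String) : Prop := out = del_empty_lines_alt sometext
instance (sometext : String) (out : String) : Decidable (Spec_del_empty_lines sometext out) := by unfold Spec_del_empty_lines; infer_instance

-- ===== CLAIM (what is proved, stated in full; the proofs are below) =====
def Claim_equal_del_empty_lines : Prop := ∀ (sometext : String), Dom_del_empty_lines sometext → Spec_del_empty_lines sometext (del_empty_lines sometext)

-- ===== LEMMAS AND PROOFS =====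

theorem pvLoopB_nil : pvLoopB [] = [] := by simp [pvLoopB]

theorem pvLoopB_nonblank (l : String) (xs : List String) (h : l ≠ "") :
    pvLoopB (l :: xs) = l :: pvLoopB xs := by
  rw [pvLoopB, if_pos h]

theorem pvLoopB_blank_nil : pvLoopB [""] = [] := by
  rw [pvLoopB, if_neg (by simp)]
  simp [pvLoopB_nil]

theorem pvLoopB_blank_nonblank (r : String) (xs : List String) (h : r ≠ "") :
    pvLoopB ("" :: r :: xs) = pvLoopB (r :: xs) := by
  rw [pvLoopB, if_neg (by simp)]
  simp [List.takeWhile, List.dropWhile, h]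

theorem pvLoopB_blank_blank (xs : List String) :
    pvLoopB ("" :: "" :: xs) = "" :: pvLoopB xs := by
  rw [pvLoopB, if_neg (by simp)]
  simp only [List.takeWhile, List.dropWhile, decide_true]
  match xs with
  | [] => simp [pvLoopB_nil]
  | t :: tl =>
    by_cases ht : t = ""
    · subst ht
      rw [pvLoopB, if_neg (by simp)]
      simp only [List.takeWhile, List.dropWhile, decide_true, List.length_cons]
      generalize (List.takeWhile (fun x => decide (x = "")) tl).length = k
      have h2 : (1 + (k + 1 + 1)) / 2 = (1 + k) / 2 + 1 := by omega
      rw [h2, List.replicate_succ]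
      rfl
    · rw [pvLoopB_nonblank t tl ht]
      simp [List.takeWhile, List.dropWhile, ht, pvLoopB_nonblank t tl ht]

theorem pvLoop_eq : ∀ (xs : List String), pvLoopA xs = pvLoopB xs := by
  intro xs
  induction xs using pvLoopA.induct with
  | case1 => rw [pvLoopA, pvLoopB_nil]
  | case2 l h => rw [pvLoopA, if_pos h, pvLoopB_nonblank l [] h, pvLoopB_nil]
  | case3 l h =>
    have h' : l = "" := by simpa using h
    subst h'
    rw [pvLoopA, if_neg (by simp), pvLoopB_blank_nil]
  | case4 l r rest' h ih => rw [pvLoopA, if_pos h, pvLoopB_nonblank l _ h, ih]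
  | case5 l rest' h ih =>
    have h' : l = "" := by simpa using h
    subst h'
    rw [pvLoopA, if_neg (by simp), if_pos rfl, pvLoopB_blank_blank, ih]
  | case6 l r rest' h hr ih =>
    have h' : l = "" := by simpa using h
    subst h'
    rw [pvLoopA, if_neg (by simp), if_neg hr, pvLoopB_blank_nonblank r rest' hr, ih]

-- ===== VERDICT (by name: the statement is the Claim_ definition above) =====
theorem del_empty_lines_spec : Claim_equal_del_empty_lines := by
  intro s _
  unfold Spec_del_empty_lines del_empty_lines del_empty_lines_alt
  rw [pvLoop_eq]
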